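-- pv_equiv track=rewrite | github.com/STAR-0501/turing-complete | app.py | _resolve_ref_to_id
-- ===== SOURCE A (Python) =====
-- def _resolve_ref_to_id(value, state):
--     if value is None:
--         return None
--     if not isinstance(value, str):
--         return value
--     v = value.strip()
--     if not v:
--         return v
--     elements = (state or {}).get("elements") or []
--     for el in elements:
--         if el.get("id") == v:
--             return v
--     for el in elements:
--         if (el.get("alias") or "").strip() == v:
--             return el.get("id")
--     if v.startswith("$"):
--         raw = v[1:]
--         for el in elements:
--             if (el.get("alias") or "").strip() == raw:
--                 return el.get("id")
--     return v
-- ===== SOURCE B (Python) =====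
-- _MISS = object()
--
-- def _resolve_ref_to_id(value, state):
--     if value is None:
--         return None
--     if not isinstance(value, str):
--         return value
--     v = value.strip()
--     if not v:
--         return v
--     elements = (state or {}).get("elements") or []
--     raw = v[1:] if v.startswith("$") else None
--     alias_hit = _MISS
--     dollar_hit = _MISS
--     for el in elements:
--         if el.get("id") == v:
--             return v  # an id match anywhere wins and always yields v
--         a = (el.get("alias") or "").strip()
--         if alias_hit is _MISS and a == v:
--             alias_hit = el.get("id")
--         if raw is not None and dollar_hit is _MISS and a == raw:
--             dollar_hit = el.get("id")
--     if alias_hit is not _MISS: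
--         return alias_hit
--     if dollar_hit is not _MISS:
--         return dollar_hit
--     return v
-- ===== Notes on version B (the rewrite author's own statement) =====
-- stated objective: alternative
-- what changed: Replaces A's three staged scans over elements (id scan, then alias scan, then $-alias scan) by ONE loop that early-returns on an id match and accumulates the first alias match and the first $-alias match, choosing by priority after the loop.
import Mathlib
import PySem

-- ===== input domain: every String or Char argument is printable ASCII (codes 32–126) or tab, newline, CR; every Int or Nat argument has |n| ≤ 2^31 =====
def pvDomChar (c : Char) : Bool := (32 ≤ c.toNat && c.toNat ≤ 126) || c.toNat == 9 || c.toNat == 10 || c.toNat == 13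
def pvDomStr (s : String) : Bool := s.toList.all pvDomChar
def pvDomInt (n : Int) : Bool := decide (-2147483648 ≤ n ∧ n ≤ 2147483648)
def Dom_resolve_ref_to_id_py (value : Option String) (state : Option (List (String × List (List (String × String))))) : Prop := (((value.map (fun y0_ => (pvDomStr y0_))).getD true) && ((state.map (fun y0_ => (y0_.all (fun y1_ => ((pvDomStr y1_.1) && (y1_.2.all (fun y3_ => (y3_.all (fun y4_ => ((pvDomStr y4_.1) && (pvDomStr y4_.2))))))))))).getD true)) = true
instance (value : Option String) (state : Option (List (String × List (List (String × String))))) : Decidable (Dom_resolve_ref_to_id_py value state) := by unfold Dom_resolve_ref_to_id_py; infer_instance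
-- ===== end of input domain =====

-- B collapses A's three staged scans (id, alias, $-alias) into ONE loop with an
-- early return on id match and first-wins accumulators for the two alias forms
-- (alternative decomposition, same cost).

-- ===== PORT A =====
-- el.get(k) on an element dict
def pvElGet (el : List (String × String)) (k : String) : Option String :=
  (PySem.Dict.mk el).get? k

-- (el.get("alias") or "").strip()
def pvAliasKey (el : List (String × String)) : String :=
  PySem.Str.strip ((pvElGet el "alias").getD "")

-- first loop of A: 'for el in elements: if el.get("id") == v: return v'
def pvIdScan (v : String) : List (List (String × String)) → Option String
  | [] => none
  | el :: rest => if pvElGet el "id" = some v then some v else pvIdScan v rest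

-- A's alias loop: 'for el in elements: if (el.get("alias") or "").strip() == k: return el.get("id")'
-- (some r = the loop returned r, which is el.get("id") : Option String)
def pvAliasScan (k : String) : List (List (String × String)) → Option (Option String)
  | [] => none
  | el :: rest => if pvAliasKey el = k then some (pvElGet el "id") else pvAliasScan k rest

def resolve_ref_to_id_py (value : Option String) (state : Option (List (String × List (List (String × String))))) : Option String :=
  match value with
  | none => none
  | some s =>
    let v := PySem.Str.strip s
    if v = "" then some v
    else
      let elements := ((PySem.Dict.mk (state.getD [])).get? "elements").getD []
      match pvIdScan v elements with
      | some r => some r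
      | none =>
        match pvAliasScan v elements with
        | some r => r
        | none =>
          if PySem.Str.startswith v "$" then
            let raw := PySem.Str.slice v (some 1) none
            match pvAliasScan raw elements with
            | some r => r
            | none => some v
          else some v

-- ===== PORT B =====
-- B's one loop: early return on id match, first-wins accumulators aliasHit / dollarHit
-- (none plays the role of the _MISS sentinel; a hit stores el.get("id") : Option String)
def pvScan (v : String) (raw : Option String) :
    List (List (String × String)) → Option (Option String) → Option (Option String) → Option String
  | [], aliasHit, dollarHit =>
      match aliasHit with
      | some r => r
      | none =>
        match dollarHit with
        | some r => r
        | none => some v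
  | el :: rest, aliasHit, dollarHit =>
      if pvElGet el "id" = some v then some v
      else
        let a := pvAliasKey el
        let aliasHit' := if aliasHit = none ∧ a = v then some (pvElGet el "id") else aliasHit
        let dollarHit' :=
          if raw ≠ none ∧ dollarHit = none ∧ some a = raw then some (pvElGet el "id") else dollarHit
        pvScan v raw rest aliasHit' dollarHit'

def resolve_ref_to_id_py_alt (value : Option String) (state : Option (List (String × List (List (String × String))))) : Option String :=
  match value with
  | none => none
  | some s =>
    let v := PySem.Str.strip s
    if v = "" then some v
    else
      let elements := ((PySem.Dict.mk (state.getD [])).get? "elements").getD []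
      let raw := if PySem.Str.startswith v "$" then some (PySem.Str.slice v (some 1) none) else none
      pvScan v raw elements none none

-- ===== PRECONDITION & SPEC =====
def Spec_resolve_ref_to_id_py (value : Option String) (state : Option (List (String × List (List (String × String))))) (out : Option String) : Prop := out = resolve_ref_to_id_py_alt value state
instance (value : Option String) (state : Option (List (String × List (List (String × String))))) (out : Option String) : Decidable (Spec_resolve_ref_to_id_py value state out) := by unfold Spec_resolve_ref_to_id_py; infer_instance

-- ===== CLAIM (what is proved, stated in full; the proofs are below) =====
def Claim_equal_resolve_ref_to_id_py : Prop := ∀ (value : Option String) (state : Option (List (String × List (List (String × String))))), Dom_resolve_ref_to_id_py value state → Spec_resolve_ref_to_id_py value state (resolve_ref_to_id_py value state)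

-- ===== LEMMAS AND PROOFS =====

-- B's single loop equals A's staged scans, for any accumulator state
lemma pvScan_eq (v : String) (raw : Option String) (els : List (List (String × String)))
    (aH dH : Option (Option String)) :
    pvScan v raw els aH dH =
      match pvIdScan v els with
      | some r => some r
      | none =>
        match aH.or (pvAliasScan v els) with
        | some r => r
        | none =>
          match dH.or (match raw with | some r => pvAliasScan r els | none => none) with
          | some r => r
          | none => some v := by
  induction els generalizing aH dH with
  | nil =>
    simp only [pvScan, pvIdScan, pvAliasScan]
    cases raw <;> simp [Option.or] <;> cases aH <;> cases dH <;> rfl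
  | cons el rest ih =>
    simp only [pvScan, pvIdScan, pvAliasScan]
    by_cases hid : pvElGet el "id" = some v
    · simp [hid]
    · simp only [hid, if_false, ih]
      clear ih
      have haH : (if aH = none ∧ pvAliasKey el = v then some (pvElGet el "id") else aH).or
          (pvAliasScan v rest)
          = aH.or (if pvAliasKey el = v then some (pvElGet el "id") else pvAliasScan v rest) := by
        cases aH with
        | some r => simp [Option.or]
        | none => by_cases hk : pvAliasKey el = v <;> simp [hk, Option.or]
      have hdH : (if raw ≠ none ∧ dH = none ∧ some (pvAliasKey el) = raw then
            some (pvElGet el "id") else dH).or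
            (match raw with | some r => pvAliasScan r rest | none => none)
          = dH.or (match raw with
              | some r => if pvAliasKey el = r then some (pvElGet el "id") else pvAliasScan r rest
              | none => none) := by
        cases raw with
        | none => simp
        | some r =>
          cases dH with
          | some w => simp [Option.or]
          | none =>
            by_cases hk : pvAliasKey el = r
            · simp [hk, Option.or]
            · have : (some (pvAliasKey el) = some r) = False := by simp [hk]
              simp [hk, this, Option.or]
      rw [haH, hdH]

-- ===== VERDICT (by name: the statement is the Claim_ definition above) =====
theorem resolve_ref_to_id_py_spec : Claim_equal_resolve_ref_to_id_py := by
  intro value state _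
  unfold Spec_resolve_ref_to_id_py resolve_ref_to_id_py resolve_ref_to_id_py_alt
  cases value with
  | none => rfl
  | some s =>
    simp only
    by_cases hv : PySem.Str.strip s = ""
    · simp [hv]
    · simp only [hv, if_false]
      set v := PySem.Str.strip s
      set elements := ((PySem.Dict.mk (state.getD [])).get? "elements").getD []
      rw [pvScan_eq]
      simp only [Option.none_or]
      cases pvIdScan v elements with
      | some r => rfl
      | none =>
        cases pvAliasScan v elements with
        | some r => rfl
        | none =>
          by_cases hd : PySem.Str.startswith v "$" = true
          · rw [if_pos hd, if_pos hd]
          · rw [if_neg hd, if_neg hd]
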